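-- pv_equiv track=rewrite | github.com/Riesuu/falcon-pad | trtt.py | _parse_props
-- ===== SOURCE A (Python) =====
-- from typing import Dict, List, Optional, Tuple
--
-- def _parse_props(rest: str) -> Dict[str, str]:
--     """Parse comma-separated key=value pairs (handles escaped commas)."""
--     props: Dict[str, str] = {}
--     i = start_i = 0
--     while i <= len(rest):
--         if i == len(rest) or (rest[i] == ',' and (i == 0 or rest[i - 1] != '\\')):
--             part = rest[start_i:i]
--             if '=' in part:
--                 k, v = part.split('=', 1)
--                 props[k.strip()] = v.strip()
--             start_i = i + 1
--         i += 1
--     return props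
-- ===== SOURCE B (Python) =====
-- from typing import Dict, List, Optional, Tuple
--
-- def _parse_props(rest: str) -> Dict[str, str]:
--     """Parse comma-separated key=value pairs (handles escaped commas)."""
--     props: Dict[str, str] = {}
--     merged: List[str] = []
--     for piece in rest.split(','):
--         if merged and merged[-1].endswith('\\'):
--             merged[-1] = merged[-1] + ',' + piece
--         else:
--             merged.append(piece)
--     for part in merged:
--         if '=' in part:
--             k, v = part.split('=', 1)
--             props[k.strip()] = v.strip()
--     return props
-- ===== Notes on version B (the rewrite author's own statement) =====
-- stated objective: idiomatic
-- what changed: Replaces A's hand-written character-index walk with the idiomatic two-phase form: str.split on the comma separator into raw pieces, a pass re-joining pieces whose predecessor ends in a backslash (an escaped comma), then a plain parse loop over the merged parts.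
import Mathlib
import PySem

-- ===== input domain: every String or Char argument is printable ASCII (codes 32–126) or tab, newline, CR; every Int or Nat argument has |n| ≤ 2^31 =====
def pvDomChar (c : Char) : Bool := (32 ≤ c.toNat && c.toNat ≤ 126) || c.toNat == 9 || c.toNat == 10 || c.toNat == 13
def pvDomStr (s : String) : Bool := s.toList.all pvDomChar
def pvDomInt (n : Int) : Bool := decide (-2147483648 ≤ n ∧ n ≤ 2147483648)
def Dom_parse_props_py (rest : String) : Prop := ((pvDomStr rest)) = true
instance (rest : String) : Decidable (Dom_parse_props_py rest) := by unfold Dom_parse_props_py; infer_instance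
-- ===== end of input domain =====

-- B replaces A's hand-written index walk by str.split(',') followed by re-joining the pieces
-- whose predecessor ends in a backslash (an escaped comma); objective: idiomatic.

-- shared inner block of both Pythons:  if '=' in part: k, v = part.split('=', 1); props[k.strip()] = v.strip()
def procPart (props : PySem.Dict String String) (part : List Char) : PySem.Dict String String :=
  if PySem.Chars.isIn ['='] part then
    match PySem.Chars.splitOnMax part ['='] 1 with
    | [k, v] => props.insert (String.ofList (PySem.Chars.strip k)) (String.ofList (PySem.Chars.strip v))
    | _ => props   -- unreachable: '=' in part guarantees a 2-way split
  else props

-- ===== PORT A =====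
-- A's while-loop body; state = (props, start_i), loop variable i.
-- rest[i] / rest[i-1] are read with getD: both reads are guarded in range by the
-- short-circuit of the Python condition, so the default is never the value used.
def stepA (cs : List Char) (n : Nat) (st : PySem.Dict String String × Nat) (i : Nat) :
    PySem.Dict String String × Nat :=
  if i = n ∨ (cs.getD i ' ' = ',' ∧ (i = 0 ∨ cs.getD (i - 1) ' ' ≠ '\\')) then
    (procPart st.1 (PySem.List.slice cs (some (st.2 : Int)) (some (i : Int))), i + 1)
  else st

def parse_props_py (rest : String) : List (String × String) :=
  let cs := rest.toList
  let n := cs.length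
  (((List.range (n + 1)).foldl (stepA cs n) (PySem.Dict.empty, 0)).1).items

-- ===== PORT B =====
-- B's first loop body: merge a raw piece into the list, joining when the last kept
-- piece ends with a backslash (its trailing comma was escaped).
def mstep (m : List (List Char)) (piece : List Char) : List (List Char) :=
  match m.getLast? with
  | some last =>
      if PySem.Chars.endswith last ['\\'] then m.dropLast ++ [last ++ ',' :: piece]
      else m ++ [piece]
  | none => m ++ [piece]

def parse_props_py_alt (rest : String) : List (String × String) :=
  let raw := PySem.Chars.splitOn rest.toList [',']
  let merged := raw.foldl mstep []
  (merged.foldl procPart PySem.Dict.empty).items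

-- ===== PRECONDITION & SPEC =====
def Spec_parse_props_py (rest : String) (out : List (String × String)) : Prop := out = parse_props_py_alt rest
instance (rest : String) (out : List (String × String)) : Decidable (Spec_parse_props_py rest out) := by unfold Spec_parse_props_py; infer_instance

-- ===== CLAIM (what is proved, stated in full; the proofs are below) =====
def Claim_equal_parse_props_py : Prop := ∀ (rest : String), Dom_parse_props_py rest → Spec_parse_props_py rest (parse_props_py rest)

-- ===== LEMMAS AND PROOFS =====

-- the list of parts cut at unescaped commas, scanning with the previous character
def goParts : Option Char → List Char → List Char → List (List Char)
  | _, [], acc => [acc]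
  | prev, c :: r, acc =>
    if c = ',' ∧ prev ≠ some '\\' then acc :: goParts (some c) r []
    else goParts (some c) r (acc ++ [c])

-- plain split on every comma (spec of Chars.splitOn · [','])
def mySplit : List Char → List (List Char)
  | [] => [[]]
  | c :: r => if c = ',' then [] :: mySplit r else (mySplit r).modifyHead (c :: ·)

lemma mySplit_ne_nil (l : List Char) : mySplit l ≠ [] := by
  induction l with
  | nil => simp [mySplit]
  | cons c r ih =>
    simp only [mySplit]
    split
    · simp
    · cases h : mySplit r with
      | nil => exact absurd h ih
      | cons a b => simp

lemma splitOn_go_spec : ∀ (fuel : Nat) (l cur : List Char) (acc : List (List Char)),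
    l.length < fuel →
    PySem.Chars.splitOn.go [','] fuel l cur acc =
      acc.reverse ++ (mySplit l).modifyHead (cur.reverse ++ ·) := by
  intro fuel
  induction fuel with
  | zero => intro l cur acc h; omega
  | succ f ih =>
    intro l cur acc h
    cases l with
    | nil => simp [PySem.Chars.splitOn.go, mySplit]
    | cons c r =>
      by_cases hc : c = ','
      · subst hc
        have : List.isPrefixOf [','] (',' :: r) = true := by simp [List.isPrefixOf]
        simp only [PySem.Chars.splitOn.go, this, if_pos]
        rw [show List.drop (List.length [',']) (',' :: r) = r by simp]
        rw [ih r [] (List.reverse cur :: acc) (by simpa using Nat.lt_of_succ_lt_succ h)]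
        simp only [mySplit, List.modifyHead, List.reverse_cons]
        cases hh : mySplit r with
        | nil => exact absurd hh (mySplit_ne_nil r)
        | cons a b => simp
      · have : List.isPrefixOf [','] (c :: r) = false := by
          simp [List.isPrefixOf]; exact fun hh => (hc hh.symm).elim
        simp only [PySem.Chars.splitOn.go, this, Bool.false_eq_true, if_false]
        rw [ih r (c :: cur) acc (by simpa using Nat.lt_of_succ_lt_succ h)]
        obtain ⟨hd, tl, hht⟩ : ∃ hd tl, mySplit r = hd :: tl := by
          cases hh : mySplit r with
          | nil => exact absurd hh (mySplit_ne_nil r)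
          | cons a b => exact ⟨a, b, rfl⟩
        simp [mySplit, hc, hht, List.modifyHead]

lemma splitOn_eq (l : List Char) : PySem.Chars.splitOn l [','] = mySplit l := by
  unfold PySem.Chars.splitOn
  rw [splitOn_go_spec (l.length + 1) l [] [] (Nat.lt_succ_self _)]
  cases hh : mySplit l with
  | nil => exact absurd hh (mySplit_ne_nil l)
  | cons a b => simp [List.modifyHead]

lemma endsBS (xs : List Char) : PySem.Chars.endswith xs ['\\'] = true ↔ xs.getLast? = some '\\' := by
  simp only [PySem.Chars.endswith, List.isSuffixOf_iff_suffix]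
  rw [List.getLast?_eq_some_iff]
  constructor
  · rintro ⟨t, ht⟩; exact ⟨t, ht.symm⟩
  · rintro ⟨t, ht⟩; exact ⟨t, ht.symm⟩

def mergeRec : List (List Char) → List (List Char)
  | [] => []
  | [p] => [p]
  | p :: q :: rest =>
    if PySem.Chars.endswith p ['\\'] then mergeRec ((p ++ ',' :: q) :: rest)
    else p :: mergeRec (q :: rest)
termination_by l => l.length

lemma mergeRec_singleton (p : List Char) : mergeRec [p] = [p] := by simp [mergeRec]

lemma mergeRec_cons_cons (p q : List Char) (rest : List (List Char)) :
    mergeRec (p :: q :: rest) =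
      if PySem.Chars.endswith p ['\\'] then mergeRec ((p ++ ',' :: q) :: rest)
      else p :: mergeRec (q :: rest) := by
  rw [mergeRec.eq_def]

lemma foldl_mstep (ps : List (List Char)) : ∀ (m : List (List Char)) (p : List Char),
    ps.foldl mstep (m ++ [p]) = m ++ mergeRec (p :: ps) := by
  induction ps with
  | nil => intro m p; simp [mergeRec_singleton]
  | cons q ps ih =>
    intro m p
    have hl : (m ++ [p]).getLast? = some p := by simp
    by_cases h : PySem.Chars.endswith p ['\\']
    · have : mstep (m ++ [p]) q = m ++ [p ++ ',' :: q] := by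
        simp [mstep, hl, h]
      rw [List.foldl_cons, this, ih m (p ++ ',' :: q), mergeRec_cons_cons, if_pos h]
    · have : mstep (m ++ [p]) q = (m ++ [p]) ++ [q] := by
        simp [mstep, hl, h]
      rw [List.foldl_cons, this, ih (m ++ [p]) q, mergeRec_cons_cons, if_neg h]
      simp

lemma merge_split (r : List Char) : ∀ (acc : List Char) (p : Option Char),
    ((p = some '\\') ↔ (PySem.Chars.endswith acc ['\\'] = true)) →
    mergeRec ((mySplit r).modifyHead (acc ++ ·)) = goParts p r acc := by
  induction r with
  | nil => intro acc p _; simp [mySplit, mergeRec_singleton, goParts, List.modifyHead]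
  | cons c r ih =>
    intro acc p hp
    obtain ⟨hd, tl, hht⟩ : ∃ hd tl, mySplit r = hd :: tl := by
      cases hh : mySplit r with
      | nil => exact absurd hh (mySplit_ne_nil r)
      | cons a b => exact ⟨a, b, rfl⟩
    by_cases hc : c = ','
    · subst hc
      have hms : (mySplit (',' :: r)).modifyHead (fun x => acc ++ x) = acc :: hd :: tl := by
        simp [mySplit, hht, List.modifyHead]
      rw [hms, mergeRec_cons_cons]
      by_cases he : PySem.Chars.endswith acc ['\\'] = true
      · have hps : p = some '\\' := hp.mpr he
        have hg : goParts p (',' :: r) acc = goParts (some ',') r (acc ++ [',']) := by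
          simp [goParts, hps]
        rw [if_pos he, hg]
        have := ih (acc ++ [',']) (some ',') (by simp [endsBS])
        rw [hht] at this
        simpa [List.modifyHead, List.append_assoc] using this
      · have hps : ¬ p = some '\\' := fun hh => he (hp.mp hh)
        have hg : goParts p (',' :: r) acc = acc :: goParts (some ',') r [] := by
          simp [goParts, hps]
        rw [if_neg he, hg]
        have := ih ([]) (some ',') (by simp [endsBS])
        rw [hht] at this
        simpa [List.modifyHead] using this
    · have hms : (mySplit (c :: r)).modifyHead (fun x => acc ++ x) = (acc ++ c :: hd) :: tl := by
        simp [mySplit, hc, hht, List.modifyHead]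
      have hg : goParts p (c :: r) acc = goParts (some c) r (acc ++ [c]) := by
        simp [goParts, hc]
      rw [hms, hg]
      have := ih (acc ++ [c]) (some c) (by simp [endsBS])
      rw [hht] at this
      simpa [List.modifyHead, List.append_assoc] using this

-- previous character seen by A's scan at index i
def prevO (cs : List Char) (i : Nat) : Option Char :=
  if i = 0 then none else some (cs.getD (i - 1) ' ')

lemma lemA (cs : List Char) : ∀ (k i : Nat), i + k = cs.length + 1 → i ≤ cs.length →
    ∀ (start : Nat) (props : PySem.Dict String String), start ≤ i →
    ((List.range' i k).foldl (stepA cs cs.length) (props, start)).1 =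
      List.foldl procPart props
        (goParts (prevO cs i) (cs.drop i) (List.take (i - start) (List.drop start cs))) := by
  intro k
  induction k with
  | zero => intro i hk hi; omega
  | succ k ih =>
    intro i hk hi start props hs
    rw [List.range'_succ, List.foldl_cons]
    by_cases hin : i = cs.length
    · -- last iteration: i = n, boundary fires, remaining range is empty (k = 0)
      have hk0 : k = 0 := by omega
      subst hk0; subst hin
      simp only [stepA, List.range'_zero, List.foldl_nil]
      rw [List.drop_length]
      simp only [goParts, List.foldl_cons, List.foldl_nil]
      rw [PySem.List.slice_natCast]
      simp
    · have hilt : i < cs.length := by omega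
      have hdrop : cs.drop i = cs[i] :: cs.drop (i + 1) :=
        (List.drop_eq_getElem_cons hilt)
      have hgetD : cs.getD i ' ' = cs[i] := by
        simp [List.getD_eq_getElem?_getD, List.getElem?_eq_getElem hilt]
      by_cases hb : cs[i] = ',' ∧ prevO cs i ≠ some '\\'
      · have hcond : i = cs.length ∨ (cs.getD i ' ' = ',' ∧ (i = 0 ∨ cs.getD (i - 1) ' ' ≠ '\\')) := by
          right
          refine ⟨by rw [hgetD]; exact hb.1, ?_⟩
          by_cases h0 : i = 0
          · exact Or.inl h0
          · refine Or.inr ?_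
            have := hb.2
            simp [prevO, h0] at this
            exact this
        simp only [stepA, if_pos hcond]
        rw [ih (i + 1) (by omega) (by omega) (i + 1) _ (le_refl _)]
        rw [hdrop]
        simp only [goParts, if_pos hb, List.foldl_cons]
        rw [PySem.List.slice_natCast]
        have hprev : prevO cs (i + 1) = some cs[i] := by
          simp [prevO, List.getD_eq_getElem?_getD, List.getElem?_eq_getElem hilt]
        rw [hprev]
        simp
      · have hcond : ¬ (i = cs.length ∨ (cs.getD i ' ' = ',' ∧ (i = 0 ∨ cs.getD (i - 1) ' ' ≠ '\\'))) := by
          rintro (h | ⟨h1, h2⟩)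
          · exact hin h
          · apply hb
            refine ⟨by rw [← hgetD]; exact h1, ?_⟩
            rcases h2 with h0 | hne
            · simp [prevO, h0]
            · intro hcontra
              by_cases h0 : i = 0
              · simp [prevO, h0] at hcontra
              · simp [prevO, h0] at hcontra
                exact hne hcontra
        simp only [stepA, if_neg hcond]
        rw [ih (i + 1) (by omega) (by omega) start props (by omega)]
        rw [hdrop]
        simp only [goParts, if_neg hb]
        have hprev : prevO cs (i + 1) = some cs[i] := by
          simp [prevO, List.getD_eq_getElem?_getD, List.getElem?_eq_getElem hilt]
        rw [hprev]
        have hacc : List.take (i + 1 - start) (List.drop start cs) =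
            List.take (i - start) (List.drop start cs) ++ [cs[i]] := by
          have h1 : i + 1 - start = (i - start) + 1 := by omega
          rw [h1, List.take_add_one]
          congr 1
          have : (List.drop start cs)[i - start]? = some cs[i] := by
            rw [List.getElem?_drop]
            have : start + (i - start) = i := by omega
            rw [this]
            exact List.getElem?_eq_getElem hilt
          simp [this]
        rw [hacc]

-- ===== VERDICT (by name: the statement is the Claim_ definition above) =====
theorem parse_props_py_spec : Claim_equal_parse_props_py := by
  intro rest _
  show parse_props_py rest = parse_props_py_alt rest
  have hA : parse_props_py rest =
      (List.foldl procPart PySem.Dict.empty (goParts none rest.toList [])).items := by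
    show (((List.range (rest.toList.length + 1)).foldl
        (stepA rest.toList rest.toList.length) (PySem.Dict.empty, 0)).1).items = _
    rw [List.range_eq_range',
      lemA rest.toList (rest.toList.length + 1) 0 (by omega) (by omega) 0 _ (le_refl _)]
    simp [prevO]
  have hB : parse_props_py_alt rest =
      (List.foldl procPart PySem.Dict.empty (goParts none rest.toList [])).items := by
    show (((PySem.Chars.splitOn rest.toList [',']).foldl mstep []).foldl
        procPart PySem.Dict.empty).items = _
    rw [splitOn_eq]
    obtain ⟨hd, tl, hht⟩ : ∃ hd tl, mySplit rest.toList = hd :: tl := by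
      cases hh : mySplit rest.toList with
      | nil => exact absurd hh (mySplit_ne_nil rest.toList)
      | cons a b => exact ⟨a, b, rfl⟩
    have hmerged : (mySplit rest.toList).foldl mstep [] = goParts none rest.toList [] := by
      rw [hht, List.foldl_cons]
      have h1 : mstep [] hd = [] ++ [hd] := by simp [mstep]
      rw [h1, foldl_mstep tl [] hd]
      have := merge_split rest.toList [] none (by simp [endsBS])
      rw [hht] at this
      simpa [List.modifyHead] using this
    rw [hmerged]
  rw [hA, hB]
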